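-- pv_equiv track=rewrite | github.com/chpollin/FemPrompt_SozArb | analysis/excel_to_ris.py | enrich_ris_entry
-- ===== SOURCE A (Python) =====
-- from typing import Dict, List, Optional, Tuple
--
-- def enrich_ris_entry(ris_entry: Dict, assessment: Dict) -> List[str]:
--     """Add assessment data to RIS entry"""
--     enriched_lines = []
--     inserted_assessment = False
--
--     for line in ris_entry['raw_lines']:
--         # Add line to output
--         enriched_lines.append(line)
--
--         # Insert assessment data before ER tag
--         if line.strip().startswith('ER  -') and not inserted_assessment:
--             # Insert assessment fields before the ER tag
--             enriched_lines.pop()  # Remove ER tag temporarily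
--
--             # Add assessment as notes (N2 tag for secondary notes)
--             if assessment.get('relevance'):
--                 enriched_lines.append(f"N2  - Assessment_Relevance: {assessment['relevance']}\n")
--             if assessment.get('quality'):
--                 enriched_lines.append(f"N2  - Assessment_Quality: {assessment['quality']}\n")
--             if assessment.get('decision'):
--                 enriched_lines.append(f"N2  - Assessment_Decision: {assessment['decision']}\n")
--             if assessment.get('exclusion_reason'):
--                 enriched_lines.append(f"N2  - Exclusion_Reason: {assessment['exclusion_reason']}\n")
--             if assessment.get('notes'):
--                 enriched_lines.append(f"N2  - Assessment_Notes: {assessment['notes']}\n")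
--             if assessment.get('reviewer'):
--                 enriched_lines.append(f"N2  - Reviewed_By: {assessment['reviewer']}\n")
--             if assessment.get('review_date'):
--                 enriched_lines.append(f"N2  - Review_Date: {assessment['review_date']}\n")
--
--             # Add as keywords for searchability
--             if assessment.get('decision'):
--                 enriched_lines.append(f"KW  - PRISMA_{assessment['decision']}\n")
--             if assessment.get('relevance'):
--                 enriched_lines.append(f"KW  - Relevance_{assessment['relevance']}\n")
--             if assessment.get('quality'):
--                 enriched_lines.append(f"KW  - Quality_{assessment['quality']}\n")
--
--             # Add composite tag
--             if assessment.get('zotero_tags'):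
--                 enriched_lines.append(f"KW  - {assessment['zotero_tags']}\n")
--
--             # Re-add ER tag
--             enriched_lines.append(line)
--             inserted_assessment = True
--
--     return enriched_lines
-- ===== SOURCE B (Python) =====
-- N2_FIELDS = [
--     ('relevance', 'Assessment_Relevance'),
--     ('quality', 'Assessment_Quality'),
--     ('decision', 'Assessment_Decision'),
--     ('exclusion_reason', 'Exclusion_Reason'),
--     ('notes', 'Assessment_Notes'),
--     ('reviewer', 'Reviewed_By'),
--     ('review_date', 'Review_Date'),
-- ]
--
-- KW_FIELDS = [
--     ('decision', 'PRISMA_'),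
--     ('relevance', 'Relevance_'),
--     ('quality', 'Quality_'),
-- ]
--
-- def enrich_ris_entry(ris_entry, assessment):
--     """Add assessment data to RIS entry (find ER index, then splice)."""
--     raw_lines = ris_entry['raw_lines']
--
--     block = []
--     for key, label in N2_FIELDS:
--         if assessment.get(key):
--             block.append(f"N2  - {label}: {assessment[key]}\n")
--     for key, prefix in KW_FIELDS:
--         if assessment.get(key):
--             block.append(f"KW  - {prefix}{assessment[key]}\n")
--     if assessment.get('zotero_tags'):
--         block.append(f"KW  - {assessment['zotero_tags']}\n")
--
--     i = next((j for j, line in enumerate(raw_lines)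
--               if line.strip().startswith('ER  -')), None)
--     if i is None:
--         return list(raw_lines)
--     return raw_lines[:i] + block + raw_lines[i:]
-- ===== Notes on version B (the rewrite author's own statement) =====
-- stated objective: simpler
-- what changed: Replaces A's single-pass append/pop/flag loop by a find-first-ER-index then list-splice decomposition, with the assessment block built once from (key, label) data tables instead of eleven inline if-blocks.
import Mathlib
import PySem

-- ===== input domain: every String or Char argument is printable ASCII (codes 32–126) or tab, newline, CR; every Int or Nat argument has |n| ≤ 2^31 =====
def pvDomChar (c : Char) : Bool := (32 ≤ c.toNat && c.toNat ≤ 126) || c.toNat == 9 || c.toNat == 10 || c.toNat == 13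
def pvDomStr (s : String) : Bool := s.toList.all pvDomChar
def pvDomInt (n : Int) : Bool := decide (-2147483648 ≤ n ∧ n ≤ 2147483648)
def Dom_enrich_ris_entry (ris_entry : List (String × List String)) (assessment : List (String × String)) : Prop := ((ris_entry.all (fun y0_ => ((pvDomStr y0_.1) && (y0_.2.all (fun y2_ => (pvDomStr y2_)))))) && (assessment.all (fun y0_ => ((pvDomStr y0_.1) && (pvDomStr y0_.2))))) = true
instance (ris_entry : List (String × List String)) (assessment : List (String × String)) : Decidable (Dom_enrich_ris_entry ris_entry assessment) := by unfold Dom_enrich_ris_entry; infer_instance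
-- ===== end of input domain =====

-- B replaces A's single-pass append/pop/flag loop by find-first-ER-index + splice, with the
-- assessment block built once from (key,label) tables; objective: simpler (same cost).

-- ===== PORT A =====
-- `line.strip().startswith('ER  -')`
def aIsER (line : String) : Bool := PySem.Str.startswith (PySem.Str.strip line) "ER  -"

-- truthiness of `assessment.get(k)` (values are strings: truthy iff present and non-empty)
def aTruthy (assessment : List (String × String)) (k : String) : Bool :=
  match assessment.lookup k with
  | some v => !(v == "")
  | none => false

-- `assessment[k]` inside a branch guarded by `aTruthy` (the key is present there)
def aVal (assessment : List (String × String)) (k : String) : String :=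
  (assessment.lookup k).getD ""

-- the for-loop of A: state = (enriched_lines, inserted_assessment)
def aLoop (assessment : List (String × String)) :
    List String → List String → Bool → List String
  | [], acc, _ => acc
  | line :: rest, acc, inserted =>
    let acc := acc ++ [line]                                   -- enriched_lines.append(line)
    if aIsER line && !inserted then
      let acc := acc.dropLast                                  -- enriched_lines.pop()
      let acc := if aTruthy assessment "relevance" then acc ++ ["N2  - Assessment_Relevance: " ++ aVal assessment "relevance" ++ "\n"] else acc
      let acc := if aTruthy assessment "quality" then acc ++ ["N2  - Assessment_Quality: " ++ aVal assessment "quality" ++ "\n"] else acc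
      let acc := if aTruthy assessment "decision" then acc ++ ["N2  - Assessment_Decision: " ++ aVal assessment "decision" ++ "\n"] else acc
      let acc := if aTruthy assessment "exclusion_reason" then acc ++ ["N2  - Exclusion_Reason: " ++ aVal assessment "exclusion_reason" ++ "\n"] else acc
      let acc := if aTruthy assessment "notes" then acc ++ ["N2  - Assessment_Notes: " ++ aVal assessment "notes" ++ "\n"] else acc
      let acc := if aTruthy assessment "reviewer" then acc ++ ["N2  - Reviewed_By: " ++ aVal assessment "reviewer" ++ "\n"] else acc
      let acc := if aTruthy assessment "review_date" then acc ++ ["N2  - Review_Date: " ++ aVal assessment "review_date" ++ "\n"] else acc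
      let acc := if aTruthy assessment "decision" then acc ++ ["KW  - PRISMA_" ++ aVal assessment "decision" ++ "\n"] else acc
      let acc := if aTruthy assessment "relevance" then acc ++ ["KW  - Relevance_" ++ aVal assessment "relevance" ++ "\n"] else acc
      let acc := if aTruthy assessment "quality" then acc ++ ["KW  - Quality_" ++ aVal assessment "quality" ++ "\n"] else acc
      let acc := if aTruthy assessment "zotero_tags" then acc ++ ["KW  - " ++ aVal assessment "zotero_tags" ++ "\n"] else acc
      let acc := acc ++ [line]                                 -- re-add ER tag
      aLoop assessment rest acc true
    else
      aLoop assessment rest acc inserted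

def enrich_ris_entry (ris_entry : List (String × List String)) (assessment : List (String × String)) : List String :=
  match ris_entry.lookup "raw_lines" with                      -- ris_entry['raw_lines']; none = KeyError, excluded by Pre_
  | none => []
  | some raw_lines => aLoop assessment raw_lines [] false

-- ===== PORT B =====
def bN2Fields : List (String × String) :=
  [("relevance", "Assessment_Relevance"), ("quality", "Assessment_Quality"),
   ("decision", "Assessment_Decision"), ("exclusion_reason", "Exclusion_Reason"),
   ("notes", "Assessment_Notes"), ("reviewer", "Reviewed_By"), ("review_date", "Review_Date")]

def bKwFields : List (String × String) :=
  [("decision", "PRISMA_"), ("relevance", "Relevance_"), ("quality", "Quality_")]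

def bTruthy (assessment : List (String × String)) (k : String) : Bool :=
  match assessment.lookup k with
  | some v => !(v == "")
  | none => false

def bVal (assessment : List (String × String)) (k : String) : String :=
  (assessment.lookup k).getD ""

-- the block list built by Source B's two table loops plus the zotero_tags tail
def bBlock (assessment : List (String × String)) : List String :=
  let block := bN2Fields.foldl (fun acc p =>
    if bTruthy assessment p.1 then acc ++ ["N2  - " ++ p.2 ++ ": " ++ bVal assessment p.1 ++ "\n"] else acc) []
  let block := bKwFields.foldl (fun acc p =>
    if bTruthy assessment p.1 then acc ++ ["KW  - " ++ p.2 ++ bVal assessment p.1 ++ "\n"] else acc) block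
  if bTruthy assessment "zotero_tags" then block ++ ["KW  - " ++ bVal assessment "zotero_tags" ++ "\n"] else block

def enrich_ris_entry_alt (ris_entry : List (String × List String)) (assessment : List (String × String)) : List String :=
  match ris_entry.lookup "raw_lines" with                      -- ris_entry['raw_lines']; none = KeyError, excluded by Pre_
  | none => []
  | some raw_lines =>
    -- i = next((j for j, line in enumerate(raw_lines) if line.strip().startswith('ER  -')), None)
    match raw_lines.findIdx? (fun line => PySem.Str.startswith (PySem.Str.strip line) "ER  -") with
    | none => raw_lines                                        -- list(raw_lines)
    | some i => raw_lines.take i ++ bBlock assessment ++ raw_lines.drop i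
      -- raw_lines[:i] + block + raw_lines[i:] with 0 ≤ i ≤ len: exactly take/drop

-- ===== PRECONDITION & SPEC =====
-- Pre_ excludes exactly the inputs where A raises KeyError: no 'raw_lines' key.
def Pre_enrich_ris_entry (ris_entry : List (String × List String)) (assessment : List (String × String)) : Prop :=
  (ris_entry.lookup "raw_lines").isSome = true
instance (ris_entry : List (String × List String)) (assessment : List (String × String)) : Decidable (Pre_enrich_ris_entry ris_entry assessment) := by unfold Pre_enrich_ris_entry; infer_instance

def pvWitness_enrich_ris_entry : (List (String × List String)) × (List (String × String)) :=
  ([("raw_lines", ["TY  - JOUR\n", "ER  - \n"])], [("relevance", "high")])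

def Spec_enrich_ris_entry (ris_entry : List (String × List String)) (assessment : List (String × String)) (out : List String) : Prop := out = enrich_ris_entry_alt ris_entry assessment
instance (ris_entry : List (String × List String)) (assessment : List (String × String)) (out : List String) : Decidable (Spec_enrich_ris_entry ris_entry assessment out) := by unfold Spec_enrich_ris_entry; infer_instance

-- ===== CLAIM (what is proved, stated in full; the proofs are below) =====
def Claim_equal_enrich_ris_entry : Prop := ∀ (ris_entry : List (String × List String)) (assessment : List (String × String)), Dom_enrich_ris_entry ris_entry assessment → Pre_enrich_ris_entry ris_entry assessment → Spec_enrich_ris_entry ris_entry assessment (enrich_ris_entry ris_entry assessment)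

-- ===== LEMMAS AND PROOFS =====

-- helper used only by the proofs: one conditional append, and A's full chunk as its nested form
def pvStep (c : Bool) (s : String) (l : List String) : List String := if c then l ++ [s] else l

def pvChain (a : List (String × String)) (l : List String) : List String :=
  pvStep (aTruthy a "zotero_tags") ("KW  - " ++ aVal a "zotero_tags" ++ "\n")
    (pvStep (aTruthy a "quality") ("KW  - Quality_" ++ aVal a "quality" ++ "\n")
      (pvStep (aTruthy a "relevance") ("KW  - Relevance_" ++ aVal a "relevance" ++ "\n")
        (pvStep (aTruthy a "decision") ("KW  - PRISMA_" ++ aVal a "decision" ++ "\n")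
          (pvStep (aTruthy a "review_date") ("N2  - Review_Date: " ++ aVal a "review_date" ++ "\n")
            (pvStep (aTruthy a "reviewer") ("N2  - Reviewed_By: " ++ aVal a "reviewer" ++ "\n")
              (pvStep (aTruthy a "notes") ("N2  - Assessment_Notes: " ++ aVal a "notes" ++ "\n")
                (pvStep (aTruthy a "exclusion_reason") ("N2  - Exclusion_Reason: " ++ aVal a "exclusion_reason" ++ "\n")
                  (pvStep (aTruthy a "decision") ("N2  - Assessment_Decision: " ++ aVal a "decision" ++ "\n")
                    (pvStep (aTruthy a "quality") ("N2  - Assessment_Quality: " ++ aVal a "quality" ++ "\n")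
                      (pvStep (aTruthy a "relevance") ("N2  - Assessment_Relevance: " ++ aVal a "relevance" ++ "\n") l))))))))))

theorem pvStep_append (c : Bool) (s : String) (acc l : List String) :
    pvStep c s (acc ++ l) = acc ++ pvStep c s l := by
  cases c <;> simp [pvStep]

theorem pvChain_append (a : List (String × String)) (acc : List String) :
    pvChain a acc = acc ++ pvChain a [] := by
  conv_lhs => rw [show acc = acc ++ ([] : List String) from (List.append_nil acc).symm]
  simp only [pvChain, pvStep_append]

-- A's inline chunk equals B's table-built block, prefixed by any accumulator
theorem chunk_eq_block (assessment : List (String × String)) (acc : List String) :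
    (let a := if aTruthy assessment "relevance" then acc ++ ["N2  - Assessment_Relevance: " ++ aVal assessment "relevance" ++ "\n"] else acc
     let a := if aTruthy assessment "quality" then a ++ ["N2  - Assessment_Quality: " ++ aVal assessment "quality" ++ "\n"] else a
     let a := if aTruthy assessment "decision" then a ++ ["N2  - Assessment_Decision: " ++ aVal assessment "decision" ++ "\n"] else a
     let a := if aTruthy assessment "exclusion_reason" then a ++ ["N2  - Exclusion_Reason: " ++ aVal assessment "exclusion_reason" ++ "\n"] else a
     let a := if aTruthy assessment "notes" then a ++ ["N2  - Assessment_Notes: " ++ aVal assessment "notes" ++ "\n"] else a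
     let a := if aTruthy assessment "reviewer" then a ++ ["N2  - Reviewed_By: " ++ aVal assessment "reviewer" ++ "\n"] else a
     let a := if aTruthy assessment "review_date" then a ++ ["N2  - Review_Date: " ++ aVal assessment "review_date" ++ "\n"] else a
     let a := if aTruthy assessment "decision" then a ++ ["KW  - PRISMA_" ++ aVal assessment "decision" ++ "\n"] else a
     let a := if aTruthy assessment "relevance" then a ++ ["KW  - Relevance_" ++ aVal assessment "relevance" ++ "\n"] else a
     let a := if aTruthy assessment "quality" then a ++ ["KW  - Quality_" ++ aVal assessment "quality" ++ "\n"] else a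
     if aTruthy assessment "zotero_tags" then a ++ ["KW  - " ++ aVal assessment "zotero_tags" ++ "\n"] else a)
    = acc ++ bBlock assessment := by
  show pvChain assessment acc = acc ++ bBlock assessment
  rw [pvChain_append]
  rfl

-- once inserted, the loop just copies the rest
theorem aLoop_true (assessment : List (String × String)) (rest acc : List String) :
    aLoop assessment rest acc true = acc ++ rest := by
  induction rest generalizing acc with
  | nil => simp [aLoop]
  | cons line rest ih => simp [aLoop, ih]

-- before insertion, the loop computes B's find-and-splice result
theorem aLoop_false (assessment : List (String × String)) (raw acc : List String) :
    aLoop assessment raw acc false =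
      acc ++ (match raw.findIdx? (fun line => PySem.Str.startswith (PySem.Str.strip line) "ER  -") with
              | none => raw
              | some i => raw.take i ++ bBlock assessment ++ raw.drop i) := by
  induction raw generalizing acc with
  | nil => simp [aLoop]
  | cons line rest ih =>
    rw [List.findIdx?_cons]
    have hpred : PySem.Str.startswith (PySem.Str.strip line) "ER  -" = aIsER line := rfl
    rw [hpred]
    by_cases h : aIsER line = true
    · rw [if_pos h]
      simp only [aLoop, h, Bool.not_false, Bool.and_true, if_true]
      rw [List.dropLast_concat, chunk_eq_block, aLoop_true]
      simp
    · rw [if_neg h]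
      simp only [aLoop, Bool.not_false, Bool.and_true, Bool.of_not_eq_true h, Bool.false_eq_true,
        if_false]
      rw [ih]
      cases hfi : rest.findIdx? (fun line => PySem.Str.startswith (PySem.Str.strip line) "ER  -") with
      | none => simp
      | some i => simp

-- ===== VERDICT (by name: the statement is the Claim_ definition above) =====
theorem enrich_ris_entry_spec : Claim_equal_enrich_ris_entry := by
  intro ris_entry assessment _ hpre
  unfold Spec_enrich_ris_entry enrich_ris_entry enrich_ris_entry_alt
  cases hl : ris_entry.lookup "raw_lines" with
  | none => simp [Pre_enrich_ris_entry, hl] at hpre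
  | some raw =>
    show aLoop assessment raw [] false = _
    rw [aLoop_false]
    simp only [List.nil_append]
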